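-- pv_equiv track=rewrite | github.com/plarmixbluster/Codons | Codons.py | isPotentialGene
-- ===== SOURCE A (Python) =====
-- start_codon = "ATG"
--
-- stop_codon = ("TAG", "TAA", "TGA")
--
-- def isPotentialGene(DNA: str):
--     if (len(DNA) % 3) != 0:
--         return False
--
--     if not DNA.startswith(start_codon):
--         return False
--
--     for i in range(len(DNA) - 3):
--         if i % 3 == 0:
--             if DNA[i:i+3] in stop_codon:
--                 return False
--
--     if DNA.endswith(stop_codon[0]):
--         return True
--     if DNA.endswith(stop_codon[1]):
--         return True
--     if DNA.endswith(stop_codon[2]):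
--         return True
--     return False
-- ===== SOURCE B (Python) =====
-- start_codon = "ATG"
--
-- stop_codons = {"TAA", "TAG", "TGA"}
--
-- def isPotentialGene(DNA: str):
--     if len(DNA) % 3 != 0 or DNA[:3] != start_codon:
--         return False
--     # consume the remainder codon by codon: earlier codons must not be stops,
--     # the final codon must be a stop
--     s = DNA[3:]
--     while True:
--         if not s:
--             return False
--         head, tail = s[:3], s[3:]
--         if not tail:
--             return head in stop_codons
--         if head in stop_codons:
--             return False
--         s = tail
-- ===== Notes on version B (the rewrite author's own statement) =====
-- stated objective: simpler
-- what changed: Replaced A's aligned index loop over range(len-3) with slicing plus three separate endswith checks by a single pass that consumes the string codon by codon (earlier codons must not be stops, the final codon must be one).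
import Mathlib
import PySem

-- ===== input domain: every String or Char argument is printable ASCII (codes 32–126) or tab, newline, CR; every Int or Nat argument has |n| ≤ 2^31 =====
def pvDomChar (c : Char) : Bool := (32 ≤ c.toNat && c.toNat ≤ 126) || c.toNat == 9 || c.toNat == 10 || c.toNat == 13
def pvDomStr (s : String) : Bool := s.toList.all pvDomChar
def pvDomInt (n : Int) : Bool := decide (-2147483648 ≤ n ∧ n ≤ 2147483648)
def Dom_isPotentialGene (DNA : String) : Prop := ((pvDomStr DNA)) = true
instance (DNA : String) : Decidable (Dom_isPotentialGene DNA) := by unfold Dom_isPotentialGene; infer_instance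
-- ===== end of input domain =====

-- B replaces A's aligned index loop plus three endswith checks by a recursion that
-- consumes the string codon by codon; objective: simpler.

-- ===== PORT A =====
-- membership test `DNA[i:i+3] in stop_codon` against the tuple ("TAG", "TAA", "TGA")
def stopCodonA (c : List Char) : Bool :=
  c == "TAG".toList || c == "TAA".toList || c == "TGA".toList

def isPotentialGene (DNA : String) : Bool :=
  let s := DNA.toList
  if s.length % 3 != 0 then false
  else if !(PySem.Chars.startswith s "ATG".toList) then false
  else if (PySem.List.pyRange 0 ((s.length : Int) - 3) 1).any
      (fun i => PySem.Int.mod i 3 == 0 &&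
        stopCodonA (PySem.List.slice s (some i) (some (i + 3)))) then false
  else
    PySem.Chars.endswith s "TAG".toList ||
    PySem.Chars.endswith s "TAA".toList ||
    PySem.Chars.endswith s "TGA".toList

-- ===== PORT B =====
-- membership in the set {"TAA", "TAG", "TGA"}
def stopCodonB (c : List Char) : Bool :=
  c == "TAA".toList || c == "TAG".toList || c == "TGA".toList

def restOk (s : List Char) : Bool :=
  if s.isEmpty then false
  else
    let head := s.take 3
    let tail := s.drop 3
    if tail.isEmpty then stopCodonB head
    else !stopCodonB head && restOk tail
termination_by s.length
decreasing_by cases s <;> simp_all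

def isPotentialGene_alt (DNA : String) : Bool :=
  let s := DNA.toList
  if s.length % 3 != 0 || s.take 3 != "ATG".toList then false
  else restOk (s.drop 3)

-- ===== PRECONDITION & SPEC =====
def Spec_isPotentialGene (DNA : String) (out : Bool) : Prop := out = isPotentialGene_alt DNA
instance (DNA : String) (out : Bool) : Decidable (Spec_isPotentialGene DNA out) := by unfold Spec_isPotentialGene; infer_instance

-- ===== CLAIM (what is proved, stated in full; the proofs are below) =====
def Claim_equal_isPotentialGene : Prop := ∀ (DNA : String), Dom_isPotentialGene DNA → Spec_isPotentialGene DNA (isPotentialGene DNA)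

-- ===== LEMMAS AND PROOFS =====

theorem stopCodon_eq (c : List Char) : stopCodonA c = stopCodonB c := by
  unfold stopCodonA stopCodonB
  cases h1 : c == "TAG".toList <;> cases h2 : c == "TAA".toList <;> simp

theorem forall_codon_shift (n : Nat) (P : Nat → Prop) :
    (∀ j, 3 * j + 3 < n → P j) ↔ ((3 < n → P 0) ∧ ∀ j, 3 * j + 6 < n → P (j + 1)) := by
  constructor
  · exact fun h => ⟨fun h3 => h 0 (by omega), fun j hj => h (j + 1) (by omega)⟩
  · rintro ⟨h0, hs⟩ j hj
    cases j with
    | zero => exact h0 (by omega)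
    | succ k => exact hs k (by omega)

-- characterisation of B's codon recursion on codon-aligned inputs
theorem restOk_iff (n : Nat) : ∀ t : List Char, t.length = n → 3 ∣ n →
    (restOk t = true ↔
      t ≠ [] ∧ (∀ j : Nat, 3 * j + 3 < t.length → stopCodonB ((t.drop (3 * j)).take 3) = false) ∧
      stopCodonB (t.drop (t.length - 3)) = true) := by
  induction n using Nat.strong_induction_on with
  | _ n ih =>
    intro t hlen h3
    by_cases ht : t = []
    · subst ht
      rw [restOk]
      simp
    · have hpos : 0 < t.length := List.length_pos_iff.mpr ht
      by_cases h6 : t.length ≤ 3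
      · have hlen3 : t.length = 3 := by omega
        have htail : t.drop 3 = [] := by
          rw [List.drop_eq_nil_iff]; omega
        rw [restOk]
        simp only [List.isEmpty_iff, ht, if_false, htail, if_true,
          List.take_of_length_le (le_of_eq hlen3)]
        constructor
        · intro h
          refine ⟨ht, fun j hj => by omega, ?_⟩
          simpa [hlen3] using h
        · rintro ⟨-, -, h⟩
          simpa [hlen3] using h
      · have h6' : 6 ≤ t.length := by omega
        have htne : t.drop 3 ≠ [] := by
          intro h
          have := congrArg List.length h
          simp at this
          omega
        have htl : (t.drop 3).length = n - 3 := by simp [hlen]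
        have IH := ih (n - 3) (by omega) (t.drop 3) htl (by omega)
        have hdd : ∀ m : Nat, (t.drop 3).drop m = t.drop (m + 3) := fun m => by
          simp [List.drop_drop]; omega
        have F3 : (t.drop 3).drop ((t.drop 3).length - 3) = t.drop (t.length - 3) := by
          rw [hdd]; congr 1; simp; omega
        rw [restOk]
        simp only [List.isEmpty_iff, ht, if_false, htne]
        rw [Bool.and_eq_true, Bool.not_eq_true', IH]
        constructor
        · rintro ⟨hhead, -, hall, hlast⟩
          refine ⟨ht, ?_, by rwa [F3] at hlast⟩
          rw [forall_codon_shift]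
          refine ⟨fun _ => by simpa using hhead, fun j hj => ?_⟩
          have h1 := hall j (by simp [htl, hlen] at *; omega)
          rw [hdd] at h1
          have e : 3 * (j + 1) = 3 * j + 3 := by ring
          rw [e]
          exact h1
        · rintro ⟨-, hall, hlast⟩
          rw [forall_codon_shift] at hall
          refine ⟨by simpa using hall.1 (by omega), htne, fun j hj => ?_, by rwa [← F3] at hlast⟩
          have h1 := hall.2 j (by simp [htl, hlen] at hj ⊢; omega)
          have e : 3 * (j + 1) = 3 * j + 3 := by ring
          rw [e] at h1
          rw [hdd]
          exact h1

-- A's scan over aligned indices, as a statement about codon offsets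
theorem loop_false_iff (s : List Char) :
    ((PySem.List.pyRange 0 ((s.length : Int) - 3) 1).any
      (fun i => PySem.Int.mod i 3 == 0 &&
        stopCodonA (PySem.List.slice s (some i) (some (i + 3)))) = false)
    ↔ (∀ j : Nat, 3 * j + 3 < s.length → stopCodonA ((s.drop (3 * j)).take 3) = false) := by
  rw [List.any_eq_false]
  constructor
  · intro h j hj
    have hmem : ((3 * j : Nat) : Int) ∈ PySem.List.pyRange 0 ((s.length : Int) - 3) 1 := by
      rw [PySem.List.mem_pyRange_one]
      constructor <;> [positivity; (push_cast; omega)]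
    have hp := h _ hmem
    have hmod : PySem.Int.mod ((3 * j : Nat) : Int) 3 = 0 := by
      rw [PySem.Int.mod_eq_zero_iff_dvd]
      exact ⟨(j : Int), by push_cast; ring⟩
    have hslice : PySem.List.slice s (some ((3 * j : Nat) : Int)) (some (((3 * j : Nat) : Int) + 3))
        = (s.drop (3 * j)).take 3 := by
      have e : (((3 * j : Nat) : Int) + 3) = ((3 * j + 3 : Nat) : Int) := by push_cast; ring
      rw [e, PySem.List.slice_natCast]
      congr 1
      omega
    rw [hmod, hslice] at hp
    simpa using hp
  · intro h x hx
    rw [PySem.List.mem_pyRange_one] at hx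
    by_cases hm : PySem.Int.mod x 3 = 0
    · obtain ⟨k, hk⟩ := (PySem.Int.mod_eq_zero_iff_dvd x 3).mp hm
      have hk0 : 0 ≤ k := by omega
      obtain ⟨j, rfl⟩ := Int.eq_ofNat_of_zero_le hk0
      have hxj : x = ((3 * j : Nat) : Int) := by push_cast; omega
      subst hk
      have hslice : PySem.List.slice s (some ((3 : Int) * j)) (some ((3 : Int) * j + 3))
          = (s.drop (3 * j)).take 3 := by
        have e1 : ((3 : Int) * j) = ((3 * j : Nat) : Int) := by push_cast; ring
        have e2 : ((3 : Int) * j + 3) = ((3 * j + 3 : Nat) : Int) := by push_cast; ring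
        rw [e2, e1, PySem.List.slice_natCast]
        congr 1
        omega
      have hbound : 3 * j + 3 < s.length := by
        have := hx.2
        omega
      rw [hslice, h j hbound]
      simp
    · have hb : (PySem.Int.mod x 3 == 0) = false := beq_eq_false_iff_ne.mpr hm
      simp only [hb, Bool.false_and]
      decide

-- the three endswith tests amount to: the final codon is a stop codon
theorem endOr_iff (s : List Char) :
    (PySem.Chars.endswith s "TAG".toList ||
     PySem.Chars.endswith s "TAA".toList ||
     PySem.Chars.endswith s "TGA".toList)
    = stopCodonB (s.drop (s.length - 3)) := by
  rw [← Bool.coe_iff_coe]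
  have e1 : "TAG".toList = ['T','A','G'] := rfl
  have e2 : "TAA".toList = ['T','A','A'] := rfl
  have e3 : "TGA".toList = ['T','G','A'] := rfl
  simp only [Bool.or_eq_true, PySem.Chars.endswith_iff, stopCodonB, e1, e2, e3,
    List.suffix_iff_eq_drop, List.length_cons, List.length_nil, beq_iff_eq]
  norm_num [eq_comm]
  tauto

theorem isPotentialGene_spec : Claim_equal_isPotentialGene := by
  intro DNA _
  unfold Spec_isPotentialGene isPotentialGene isPotentialGene_alt
  set s := DNA.toList with hs
  simp only []
  by_cases h3 : s.length % 3 = 0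
  · by_cases hpre : "ATG".toList <+: s
    · have hstart : PySem.Chars.startswith s "ATG".toList = true :=
        (PySem.Chars.startswith_iff _ _).mpr hpre
      have htake : s.take 3 = "ATG".toList := by
        exact (List.prefix_iff_eq_take.mp hpre).symm
      have hn3 : 3 ≤ s.length := by
        have := hpre.length_le
        simpa using this
      have cB : (s.length % 3 != 0 || s.take 3 != "ATG".toList) = false := by
        simp [h3, htake]
      have cA1 : (s.length % 3 != 0) = false := by simp [h3]
      have cA2 : (!PySem.Chars.startswith s "ATG".toList) = false := by
        simp only [hstart, Bool.not_true]
      rw [cB, cA1, cA2, if_neg Bool.false_ne_true, if_neg Bool.false_ne_true,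
        if_neg Bool.false_ne_true]
      by_cases hn : s.length = 3
      · have hdrop : s.drop 3 = [] := by rw [List.drop_eq_nil_iff]; omega
        have hs3 : s = "ATG".toList := by
          rw [← htake, List.take_of_length_le (le_of_eq hn)]
        rw [hdrop, restOk, hs3]
        simp only [List.isEmpty_nil, if_true]
        decide
      · have h6 : 6 ≤ s.length := by omega
        rw [← Bool.coe_iff_coe]
        rw [restOk_iff (s.length - 3) (s.drop 3) (by simp) (by omega)]
        have htne : s.drop 3 ≠ [] := by
          intro h
          have := congrArg List.length h
          simp at this
          omega
        have hdd : ∀ m : Nat, (s.drop 3).drop m = s.drop (m + 3) := fun m => by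
          simp [List.drop_drop]; omega
        have F3 : (s.drop 3).drop ((s.drop 3).length - 3) = s.drop (s.length - 3) := by
          rw [hdd]; congr 1; simp; omega
        have hend := endOr_iff s
        constructor
        · intro hA
          have hLoop : (PySem.List.pyRange 0 ((s.length : Int) - 3) 1).any
              (fun i => PySem.Int.mod i 3 == 0 &&
                stopCodonA (PySem.List.slice s (some i) (some (i + 3)))) = false := by
            by_contra hc
            rw [Bool.not_eq_false] at hc
            rw [if_pos hc] at hA
            exact absurd hA (by simp)
          rw [if_neg (by simp only [hLoop]; decide)] at hA
          have hall := (loop_false_iff s).mp hLoop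
          refine ⟨htne, fun j hj => ?_, ?_⟩
          · have h1 := hall (j + 1) (by simp [List.length_drop] at hj; omega)
            rw [stopCodon_eq] at h1
            have e : 3 * (j + 1) = 3 * j + 3 := by ring
            rw [e] at h1
            rw [hdd]
            exact h1
          · rw [F3, ← hend]
            exact hA
        · rintro ⟨-, hall, hlast⟩
          have hLoop : (PySem.List.pyRange 0 ((s.length : Int) - 3) 1).any
              (fun i => PySem.Int.mod i 3 == 0 &&
                stopCodonA (PySem.List.slice s (some i) (some (i + 3)))) = false := by
            rw [loop_false_iff, forall_codon_shift]
            refine ⟨fun _ => ?_, fun j hj => ?_⟩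
            · simp only [Nat.mul_zero, List.drop_zero, stopCodon_eq, htake]
              decide
            · have h1 := hall j (by simp [List.length_drop]; omega)
              rw [stopCodon_eq]
              rw [hdd] at h1
              have e : 3 * (j + 1) = 3 * j + 3 := by ring
              rw [e]
              exact h1
          rw [if_neg (by simp only [hLoop]; decide), hend, ← F3]
          exact hlast
    · have hstart : PySem.Chars.startswith s "ATG".toList = false := by
        rw [← Bool.not_eq_true, PySem.Chars.startswith_iff]
        exact hpre
      have hneq : (s.take 3 == "ATG".toList) = false := by
        rw [beq_eq_false_iff_ne]
        intro h
        exact hpre (List.prefix_iff_eq_take.mpr h.symm)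
      have cA1 : (s.length % 3 != 0) = false := by simp [h3]
      have cA2 : (!PySem.Chars.startswith s "ATG".toList) = true := by
        simp only [hstart, Bool.not_false]
      have cB : (s.length % 3 != 0 || s.take 3 != "ATG".toList) = true := by
        simp only [bne, hneq, Bool.not_false, Bool.or_true]
      rw [cB, cA1, cA2, if_neg Bool.false_ne_true, if_pos rfl, if_pos rfl]
  · simp [h3]
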